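-- pv_equiv track=rewrite | github.com/Nathan772208/satisfaculty | satisfaculty/utils.py | expand_days
-- ===== SOURCE A (Python) =====
-- def expand_days(days_str):
--     """Expand day codes to individual days. e.g. MWF -> [M, W, F], TTH -> [T, TH]"""
--     result = []
--     i = 0
--     while i < len(days_str):
--         # Check for TH (Thursday) first since it's two characters
--         if i + 1 < len(days_str) and days_str[i:i+2] == 'TH':
--             result.append('TH')
--             i += 2
--         else:
--             result.append(days_str[i])
--             i += 1
--     return result
-- ===== SOURCE B (Python) =====
-- def expand_days(days_str):
--     """Expand day codes via a sentinel: collapse each 'TH' to one placeholder char, then map chars."""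
--     return ['TH' if c == '\x00' else c for c in days_str.replace('TH', '\x00')]
-- ===== Notes on version B (the rewrite author's own statement) =====
-- stated objective: faster
-- what changed: A's manual index-based while-loop scanner is replaced by collapsing every 'TH' to a one-char sentinel with str.replace and then mapping each character of the result back to its day string.
import Mathlib
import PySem

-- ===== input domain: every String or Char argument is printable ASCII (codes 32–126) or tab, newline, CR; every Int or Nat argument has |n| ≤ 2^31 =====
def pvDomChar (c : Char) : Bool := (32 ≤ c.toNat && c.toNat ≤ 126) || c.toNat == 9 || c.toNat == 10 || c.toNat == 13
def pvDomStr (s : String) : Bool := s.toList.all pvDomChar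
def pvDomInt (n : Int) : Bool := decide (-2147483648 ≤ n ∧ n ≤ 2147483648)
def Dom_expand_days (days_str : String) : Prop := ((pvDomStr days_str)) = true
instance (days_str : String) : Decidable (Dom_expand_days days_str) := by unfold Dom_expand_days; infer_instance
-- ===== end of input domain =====

-- B replaces A's manual index-based while-loop scanner by collapsing each 'TH' to a
-- sentinel char with str.replace and mapping the resulting chars; objective: faster
-- (C-level replace; measured). Claimed on Dom (the sentinel '\x00'
-- is outside the printable-ASCII domain).


-- ===== PORT A =====
-- A's while loop over index i with an appended-to result list; on char lists,
-- days_str[i:i+2] == 'TH' is ((cs.drop i).take 2) = ['T','H'] (i ≥ 0, in range),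
-- and days_str[i] is cs[i] (guarded by i < cs.length).
def expandDaysLoopA (cs : List Char) (i : Nat) (result : List String) : List String :=
  if h : i < cs.length then
    if i + 1 < cs.length ∧ (cs.drop i).take 2 = ['T', 'H'] then
      expandDaysLoopA cs (i + 2) (result ++ ["TH"])
    else
      expandDaysLoopA cs (i + 1) (result ++ [String.ofList [cs[i]]])
  else
    result
termination_by cs.length - i
decreasing_by all_goals omega

def expand_days (days_str : String) : List String :=
  expandDaysLoopA days_str.toList 0 []

-- ===== PORT B =====
-- Source B: days_str.replace('TH', '\x00') (= PySem.Chars.replace on the char list),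
-- then the list comprehension over its chars (= map); '\x00' is Char.ofNat 0.
def expand_days_alt (days_str : String) : List String :=
  (PySem.Chars.replace days_str.toList ['T', 'H'] [Char.ofNat 0]).map
    (fun c => if c = Char.ofNat 0 then "TH" else String.ofList [c])

-- ===== PRECONDITION & SPEC =====
def Spec_expand_days (days_str : String) (out : List String) : Prop := out = expand_days_alt days_str
instance (days_str : String) (out : List String) : Decidable (Spec_expand_days days_str out) := by unfold Spec_expand_days; infer_instance

-- ===== CLAIM (what is proved, stated in full; the proofs are below) =====
def Claim_equal_expand_days : Prop := ∀ (days_str : String), Dom_expand_days days_str → Spec_expand_days days_str (expand_days days_str)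

-- ===== LEMMAS AND PROOFS =====

-- proof-only specification of the token list: 'TH' greedily, else one char
def tokSpec (cs : List Char) : List String :=
  if ['T', 'H'].isPrefixOf cs then
    "TH" :: tokSpec (cs.drop 2)
  else
    match cs with
    | [] => []
    | c :: t => String.ofList [c] :: tokSpec t
termination_by cs.length
decreasing_by
  · rename_i h
    rw [List.isPrefixOf_iff_prefix] at h
    rcases h with ⟨t, ht⟩
    subst ht; simp
  · simp

theorem tokSpec_nil : tokSpec [] = [] := by
  rw [tokSpec]; simp

theorem tokSpec_TH (rest : List Char) :
    tokSpec ('T' :: 'H' :: rest) = "TH" :: tokSpec rest := by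
  rw [tokSpec, if_pos (by rw [List.isPrefixOf_iff_prefix]; exact ⟨rest, rfl⟩)]
  simp

theorem tokSpec_cons (c : Char) (rest : List Char)
    (hsw : ['T', 'H'].isPrefixOf (c :: rest) = false) :
    tokSpec (c :: rest) = String.ofList [c] :: tokSpec rest := by
  rw [tokSpec, if_neg (by simp [hsw])]

theorem expandDaysLoopA_eq (n : Nat) : ∀ (cs : List Char) (i : Nat) (acc : List String),
    cs.length - i = n →
    expandDaysLoopA cs i acc = acc ++ tokSpec (cs.drop i) := by
  induction n using Nat.strong_induction_on with
  | _ n IH =>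
    intro cs i acc hn
    rw [expandDaysLoopA]
    by_cases h : i < cs.length
    · rw [dif_pos h]
      have hd1 : cs.drop i = cs[i] :: cs.drop (i + 1) := List.drop_eq_getElem_cons h
      by_cases hTH : i + 1 < cs.length ∧ (cs.drop i).take 2 = ['T', 'H']
      · rw [if_pos hTH,
          IH (cs.length - (i + 2)) (by omega) cs (i + 2) (acc ++ ["TH"]) rfl]
        have hd2 : cs.drop (i + 1) = cs[i + 1] :: cs.drop (i + 2) :=
          List.drop_eq_getElem_cons hTH.1
        have hdd : cs.drop i = 'T' :: 'H' :: cs.drop (i + 2) := by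
          have ht := hTH.2
          rw [hd1] at ht
          rw [hd2] at ht
          simp only [List.take_succ_cons, List.take_zero, List.cons.injEq, and_true] at ht
          rw [hd1, hd2, ht.1, ht.2]
        rw [hdd, tokSpec_TH]
        simp
      · rw [if_neg hTH,
          IH (cs.length - (i + 1)) (by omega) cs (i + 1) (acc ++ [String.ofList [cs[i]]]) rfl]
        have hsw : ['T', 'H'].isPrefixOf (cs.drop i) = false := by
          rw [Bool.eq_false_iff]
          intro hc
          rw [List.isPrefixOf_iff_prefix] at hc
          rcases hc with ⟨t, ht⟩
          apply hTH
          refine ⟨?_, ?_⟩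
          · have hl := congrArg List.length ht
            simp at hl
            omega
          · rw [← ht]; simp
        rw [hd1] at hsw
        rw [hd1, tokSpec_cons _ _ hsw]
        simp
    · rw [dif_neg h]
      rw [List.drop_eq_nil_of_le (by omega), tokSpec_nil]
      simp

-- the char → string mapping of B's comprehension
def tokMap (c : Char) : String :=
  if c = Char.ofNat 0 then "TH" else String.ofList [c]

theorem replace_go_map (fuel : Nat) : ∀ (l acc : List Char),
    l.length ≤ fuel → (Char.ofNat 0) ∉ l →
    (PySem.Chars.replace.go ['T', 'H'] [Char.ofNat 0] fuel l acc).map tokMap =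
      acc.reverse.map tokMap ++ tokSpec l := by
  induction fuel with
  | zero =>
    intro l acc hl _
    have : l = [] := List.eq_nil_of_length_eq_zero (by omega)
    subst this
    rw [PySem.Chars.replace.go, tokSpec_nil]
    simp
  | succ fuel IH =>
    intro l acc hl hnul
    cases l with
    | nil =>
      rw [PySem.Chars.replace.go, tokSpec_nil] <;> simp
    | cons c t =>
      rw [PySem.Chars.replace.go]
      by_cases hp : ['T', 'H'].isPrefixOf (c :: t) = true
      · rw [if_pos hp]
        have hpre := (List.isPrefixOf_iff_prefix).mp hp
        rcases hpre with ⟨rest, hrest⟩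
        have hct : c :: t = 'T' :: 'H' :: rest := hrest.symm
        rw [hct]
        have hlen : rest.length ≤ fuel := by
          have := congrArg List.length hct
          simp at this hl
          omega
        have hnul' : (Char.ofNat 0) ∉ rest := by
          intro hm; exact hnul (by rw [hct]; simp [hm])
        rw [show List.drop ['T', 'H'].length ('T' :: 'H' :: rest) = rest from rfl,
          IH rest _ hlen hnul', tokSpec_TH]
        simp [tokMap]
      · rw [if_neg hp]
        have hlen : t.length ≤ fuel := by simp at hl; omega
        have hnul' : (Char.ofNat 0) ∉ t := fun hm => hnul (List.mem_cons_of_mem _ hm)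
        have hc : c ≠ Char.ofNat 0 := fun he => hnul (by simp [he])
        rw [IH t _ hlen hnul',
          tokSpec_cons _ _ (by rw [Bool.eq_false_iff]; exact hp)]
        simp [tokMap, hc]

theorem alt_eq_tokSpec (s : String) (hdom : Dom_expand_days s) :
    expand_days_alt s = tokSpec s.toList := by
  have hnul : (Char.ofNat 0) ∉ s.toList := by
    intro hm
    unfold Dom_expand_days pvDomStr at hdom
    rw [List.all_eq_true] at hdom
    have := hdom _ hm
    simp [pvDomChar] at this
  unfold expand_days_alt
  rw [PySem.Chars.replace]
  rw [if_neg (by simp)]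
  have := replace_go_map s.toList.length s.toList [] le_rfl hnul
  unfold tokMap at this
  simpa using this

-- ===== VERDICT (by name: the statement is the Claim_ definition above) =====
theorem expand_days_spec : Claim_equal_expand_days := by
  intro s hdom
  unfold Spec_expand_days expand_days
  rw [alt_eq_tokSpec s hdom]
  simpa using expandDaysLoopA_eq (s.toList.length) s.toList 0 [] rfl
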